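-- pv_equiv track=rewrite | github.com/fernandalavalle/ketohub_offline_scraper | scraper/titles.py | _normalize_conventions
-- ===== SOURCE A (Python) =====
-- def _normalize_conventions(title):
--     normalized = title
--     substitutions = [('Gluten Free', 'Gluten-Free'),
--                      ('Guilt Free', 'Guilt-Free'), ('Sugar Free', 'Sugar-Free'),
--                      (' & ', ' and '), ('Slow-Cooker', 'Slow Cooker')]
--     for old, new in substitutions:
--         normalized = normalized.replace(old, new)
--
--     return normalized
-- ===== SOURCE B (Python) =====
-- SUBSTITUTIONS = (
--     ('Gluten Free', 'Gluten-Free'),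
--     ('Guilt Free', 'Guilt-Free'),
--     ('Sugar Free', 'Sugar-Free'),
--     (' & ', ' and '),
--     ('Slow-Cooker', 'Slow Cooker'),
-- )
--
--
-- def _normalize_conventions(title):
--     """Single left-to-right scan: try each pattern at the current position."""
--     pieces = []
--     i = 0
--     n = len(title)
--     while i < n:
--         for old, new in SUBSTITUTIONS:
--             if title.startswith(old, i):
--                 pieces.append(new)
--                 i += len(old)
--                 break
--         else:
--             pieces.append(title[i])
--             i += 1
--     return ''.join(pieces)
-- ===== Notes on version B (the rewrite author's own statement) =====
-- stated objective: alternative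
-- what changed: Replaced the five sequential full-string .replace() passes (each building an intermediate string) with a single left-to-right scan that tries the five patterns at each position and emits the replacement or the character, proved equal because the patterns never overlap and no replacement text re-creates a match.
import Mathlib
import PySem

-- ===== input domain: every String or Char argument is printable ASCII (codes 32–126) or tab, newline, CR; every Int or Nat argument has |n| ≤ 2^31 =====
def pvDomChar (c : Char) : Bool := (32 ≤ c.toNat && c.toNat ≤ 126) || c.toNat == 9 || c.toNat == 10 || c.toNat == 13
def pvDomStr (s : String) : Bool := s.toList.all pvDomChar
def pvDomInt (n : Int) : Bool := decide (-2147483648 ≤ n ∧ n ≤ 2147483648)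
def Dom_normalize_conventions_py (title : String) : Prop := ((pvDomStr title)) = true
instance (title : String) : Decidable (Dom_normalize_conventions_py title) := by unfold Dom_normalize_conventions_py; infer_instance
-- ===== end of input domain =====

-- B replaces A's five sequential str.replace passes (five intermediate strings) with ONE
-- left-to-right scan that tries the five patterns at each position (objective: alternative;
-- equal output because no pattern overlaps another and no replacement re-creates a pattern).

-- ===== PORT A =====
-- A: normalized = title; for old, new in substitutions: normalized = normalized.replace(old, new)
def normalize_conventions_py (title : String) : String :=
  let substitutions : List (String × String) :=
    [("Gluten Free", "Gluten-Free"), ("Guilt Free", "Guilt-Free"), ("Sugar Free", "Sugar-Free"),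
     (" & ", " and "), ("Slow-Cooker", "Slow Cooker")]
  substitutions.foldl (fun normalized on => PySem.Str.replace normalized on.1 on.2) title

-- ===== PORT B =====
-- the five (old, new) pairs of Source B, as character lists
def pvOld1 : List Char := ['G','l','u','t','e','n',' ','F','r','e','e']
def pvNew1 : List Char := ['G','l','u','t','e','n','-','F','r','e','e']
def pvOld2 : List Char := ['G','u','i','l','t',' ','F','r','e','e']
def pvNew2 : List Char := ['G','u','i','l','t','-','F','r','e','e']
def pvOld3 : List Char := ['S','u','g','a','r',' ','F','r','e','e']
def pvNew3 : List Char := ['S','u','g','a','r','-','F','r','e','e']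
def pvOld4 : List Char := [' ','&',' ']
def pvNew4 : List Char := [' ','a','n','d',' ']
def pvOld5 : List Char := ['S','l','o','w','-','C','o','o','k','e','r']
def pvNew5 : List Char := ['S','l','o','w',' ','C','o','o','k','e','r']

-- Source B's while-loop: at each position try the five patterns in order (the for/break),
-- on a hit emit the replacement and jump past the match, otherwise copy one character.
def pvScan : List Char → List Char
  | [] => []
  | c :: t =>
    if pvOld1.isPrefixOf (c :: t) then pvNew1 ++ pvScan (t.drop 10)
    else if pvOld2.isPrefixOf (c :: t) then pvNew2 ++ pvScan (t.drop 9)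
    else if pvOld3.isPrefixOf (c :: t) then pvNew3 ++ pvScan (t.drop 9)
    else if pvOld4.isPrefixOf (c :: t) then pvNew4 ++ pvScan (t.drop 2)
    else if pvOld5.isPrefixOf (c :: t) then pvNew5 ++ pvScan (t.drop 10)
    else c :: pvScan t
termination_by l => l.length
decreasing_by all_goals simp

-- Source B returns ''.join(pieces); the concatenation is built directly here
def normalize_conventions_py_alt (title : String) : String :=
  String.ofList (pvScan title.toList)

-- ===== PRECONDITION & SPEC =====
def Spec_normalize_conventions_py (title : String) (out : String) : Prop := out = normalize_conventions_py_alt title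
instance (title : String) (out : String) : Decidable (Spec_normalize_conventions_py title out) := by unfold Spec_normalize_conventions_py; infer_instance

-- ===== CLAIM (what is proved, stated in full; the proofs are below) =====
def Claim_equal_normalize_conventions_py : Prop := ∀ (title : String), Dom_normalize_conventions_py title → Spec_normalize_conventions_py title (normalize_conventions_py title)

-- ===== LEMMAS AND PROOFS =====

-- Python str.replace(old, new) for old ≠ '', as a plain recursion on the character list
def pvRep (p r : List Char) : List Char → List Char
  | [] => []
  | c :: t =>
    if p.isPrefixOf (c :: t) then r ++ pvRep p r (t.drop (p.length - 1))
    else c :: pvRep p r t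
termination_by l => l.length
decreasing_by all_goals simp

lemma pv_go_eq (old new : List Char) (h : old ≠ []) (fuel : Nat) (l acc : List Char) (hl : l.length ≤ fuel) :
    PySem.Chars.replace.go old new fuel l acc = acc.reverse ++ pvRep old new l := by
  induction fuel generalizing l acc with
  | zero =>
    cases l with
    | nil => simp [PySem.Chars.replace.go, pvRep]
    | cons c t => simp at hl
  | succ n ih =>
    cases l with
    | nil => simp [PySem.Chars.replace.go, pvRep]
    | cons c t =>
      rw [PySem.Chars.replace.go]
      by_cases hp : old.isPrefixOf (c :: t)
      · rw [if_pos hp, ih]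
        · rw [pvRep, if_pos hp]
          rw [show List.drop old.length (c :: t) = List.drop (old.length - 1) t from by
            conv_lhs => rw [show old.length = old.length - 1 + 1 from by
              have := List.length_pos_of_ne_nil h; omega]
            simp]
          simp
        · have := List.length_pos_of_ne_nil h
          simp at hl ⊢; omega
      · rw [if_neg hp, ih _ _ (by simp at hl ⊢; omega), pvRep, if_neg hp]
        simp

lemma pv_replace_eq (old new : List Char) (h : old ≠ []) (s : List Char) :
    PySem.Chars.replace s old new = pvRep old new s := by
  rw [PySem.Chars.replace, if_neg (by simpa using h)]
  simpa using pv_go_eq old new h s.length s [] le_rfl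

-- a word w whose suffixes neither begin r nor sit inside r cannot newly become a prefix under pvRep
lemma pv_prefix_through_rep (p r : List Char) :
    ∀ n (v w : List Char), v.length ≤ n →
      (∀ pos, pos < w.length → ¬ (w.drop pos <+: r) ∧ ¬ (r <+: w.drop pos)) →
      w <+: pvRep p r v → w <+: v := by
  intro n
  induction n with
  | zero =>
    intro v w hlen _ hw
    have : v = [] := by cases v <;> simp_all
    subst this
    simpa [pvRep] using hw
  | succ n ih =>
    intro v w hlen hs hw
    cases v with
    | nil => simpa [pvRep] using hw
    | cons c t =>
      by_cases hp : p.isPrefixOf (c :: t)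
      · rw [pvRep, if_pos hp] at hw
        cases w with
        | nil => exact List.nil_prefix
        | cons e w0 =>
          rcases (List.prefix_or_prefix_of_prefix hw (List.prefix_append r _)) with h | h
          · exact absurd h (hs 0 (by simp)).1
          · exact absurd h (hs 0 (by simp)).2
      · rw [pvRep, if_neg hp] at hw
        cases w with
        | nil => exact List.nil_prefix
        | cons e w0 =>
          rw [List.cons_prefix_cons] at hw ⊢
          refine ⟨hw.1, ih t w0 (by simpa using hlen) ?_ hw.2⟩
          intro pos hpos
          exact hs (pos + 1) (by simpa using Nat.succ_lt_succ hpos)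

lemma pv_prefix_cons_rep (p r : List Char) (e : Char) (w0 : List Char)
    (hs : ∀ pos, pos < w0.length → ¬ (w0.drop pos <+: r) ∧ ¬ (r <+: w0.drop pos))
    (c : Char) (v : List Char) (h : (e :: w0) <+: c :: pvRep p r v) : (e :: w0) <+: c :: v := by
  rw [List.cons_prefix_cons] at h ⊢
  exact ⟨h.1, pv_prefix_through_rep p r v.length v w0 le_rfl hs h.2⟩

lemma pv_rep_nomatch (p r : List Char) (c : Char) (t : List Char) (h : ¬ p <+: (c :: t)) :
    pvRep p r (c :: t) = c :: pvRep p r t := by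
  rw [pvRep, if_neg (by simpa [List.isPrefixOf_iff_prefix] using h)]

lemma pv_scan_nomatch (c : Char) (t : List Char)
    (h1 : ¬ pvOld1 <+: (c :: t)) (h2 : ¬ pvOld2 <+: (c :: t)) (h3 : ¬ pvOld3 <+: (c :: t))
    (h4 : ¬ pvOld4 <+: (c :: t)) (h5 : ¬ pvOld5 <+: (c :: t)) :
    pvScan (c :: t) = c :: pvScan t := by
  rw [pvScan,
    if_neg (by simpa [List.isPrefixOf_iff_prefix] using h1),
    if_neg (by simpa [List.isPrefixOf_iff_prefix] using h2),
    if_neg (by simpa [List.isPrefixOf_iff_prefix] using h3),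
    if_neg (by simpa [List.isPrefixOf_iff_prefix] using h4),
    if_neg (by simpa [List.isPrefixOf_iff_prefix] using h5)]

-- the five match branches: the whole rep-chain and the scan both consume the matched pattern
lemma pv_branch1 (u : List Char) :
    pvRep pvOld5 pvNew5 (pvRep pvOld4 pvNew4 (pvRep pvOld3 pvNew3 (pvRep pvOld2 pvNew2 (pvRep pvOld1 pvNew1 (pvOld1 ++ u))))) =
    pvNew1 ++ pvRep pvOld5 pvNew5 (pvRep pvOld4 pvNew4 (pvRep pvOld3 pvNew3 (pvRep pvOld2 pvNew2 (pvRep pvOld1 pvNew1 u)))) := by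
  simp [pvRep, pvOld1, pvNew1, pvOld2, pvNew2, pvOld3, pvNew3, pvOld4, pvNew4, pvOld5, pvNew5]

lemma pv_branch2 (u : List Char) :
    pvRep pvOld5 pvNew5 (pvRep pvOld4 pvNew4 (pvRep pvOld3 pvNew3 (pvRep pvOld2 pvNew2 (pvRep pvOld1 pvNew1 (pvOld2 ++ u))))) =
    pvNew2 ++ pvRep pvOld5 pvNew5 (pvRep pvOld4 pvNew4 (pvRep pvOld3 pvNew3 (pvRep pvOld2 pvNew2 (pvRep pvOld1 pvNew1 u)))) := by
  simp [pvRep, pvOld1, pvNew1, pvOld2, pvNew2, pvOld3, pvNew3, pvOld4, pvNew4, pvOld5, pvNew5]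

lemma pv_branch3 (u : List Char) :
    pvRep pvOld5 pvNew5 (pvRep pvOld4 pvNew4 (pvRep pvOld3 pvNew3 (pvRep pvOld2 pvNew2 (pvRep pvOld1 pvNew1 (pvOld3 ++ u))))) =
    pvNew3 ++ pvRep pvOld5 pvNew5 (pvRep pvOld4 pvNew4 (pvRep pvOld3 pvNew3 (pvRep pvOld2 pvNew2 (pvRep pvOld1 pvNew1 u)))) := by
  simp [pvRep, pvOld1, pvNew1, pvOld2, pvNew2, pvOld3, pvNew3, pvOld4, pvNew4, pvOld5, pvNew5]

lemma pv_branch4 (u : List Char) :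
    pvRep pvOld5 pvNew5 (pvRep pvOld4 pvNew4 (pvRep pvOld3 pvNew3 (pvRep pvOld2 pvNew2 (pvRep pvOld1 pvNew1 (pvOld4 ++ u))))) =
    pvNew4 ++ pvRep pvOld5 pvNew5 (pvRep pvOld4 pvNew4 (pvRep pvOld3 pvNew3 (pvRep pvOld2 pvNew2 (pvRep pvOld1 pvNew1 u)))) := by
  simp [pvRep, pvOld1, pvNew1, pvOld2, pvNew2, pvOld3, pvNew3, pvOld4, pvNew4, pvOld5, pvNew5]

lemma pv_branch5 (u : List Char) :
    pvRep pvOld5 pvNew5 (pvRep pvOld4 pvNew4 (pvRep pvOld3 pvNew3 (pvRep pvOld2 pvNew2 (pvRep pvOld1 pvNew1 (pvOld5 ++ u))))) =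
    pvNew5 ++ pvRep pvOld5 pvNew5 (pvRep pvOld4 pvNew4 (pvRep pvOld3 pvNew3 (pvRep pvOld2 pvNew2 (pvRep pvOld1 pvNew1 u)))) := by
  simp [pvRep, pvOld1, pvNew1, pvOld2, pvNew2, pvOld3, pvNew3, pvOld4, pvNew4, pvOld5, pvNew5]

lemma pv_scan1 (u : List Char) : pvScan (pvOld1 ++ u) = pvNew1 ++ pvScan u := by
  simp [pvScan, pvOld1, pvNew1]
lemma pv_scan2 (u : List Char) : pvScan (pvOld2 ++ u) = pvNew2 ++ pvScan u := by
  simp [pvScan, pvOld1, pvNew2, pvOld2]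
lemma pv_scan3 (u : List Char) : pvScan (pvOld3 ++ u) = pvNew3 ++ pvScan u := by
  simp [pvScan, pvOld1, pvNew3, pvOld2, pvOld3]
lemma pv_scan4 (u : List Char) : pvScan (pvOld4 ++ u) = pvNew4 ++ pvScan u := by
  simp [pvScan, pvOld1, pvNew4, pvOld2, pvOld3, pvOld4]
lemma pv_scan5 (u : List Char) : pvScan (pvOld5 ++ u) = pvNew5 ++ pvScan u := by
  simp [pvScan, pvOld1, pvNew5, pvOld2, pvOld3, pvOld4, pvOld5]

lemma pv_chain_eq_scan : ∀ (n : Nat) (s : List Char), s.length ≤ n →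
    pvRep pvOld5 pvNew5 (pvRep pvOld4 pvNew4 (pvRep pvOld3 pvNew3 (pvRep pvOld2 pvNew2 (pvRep pvOld1 pvNew1 s)))) = pvScan s := by
  intro n
  induction n with
  | zero =>
    intro s hs
    have : s = [] := by cases s <;> simp_all
    subst this
    simp [pvRep, pvScan]
  | succ n ih =>
    intro s hs
    cases s with
    | nil => simp [pvRep, pvScan]
    | cons c t =>
      simp only [List.length_cons] at hs
      by_cases h1 : pvOld1 <+: (c :: t)
      · obtain ⟨u, hu⟩ := h1
        rw [← hu, pv_branch1, pv_scan1, ih u (by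
          have : (pvOld1 ++ u).length = (c :: t).length := by rw [hu]
          simp [pvOld1] at this ⊢; omega)]
      · by_cases h2 : pvOld2 <+: (c :: t)
        · obtain ⟨u, hu⟩ := h2
          rw [← hu, pv_branch2, pv_scan2, ih u (by
            have : (pvOld2 ++ u).length = (c :: t).length := by rw [hu]
            simp [pvOld2] at this ⊢; omega)]
        · by_cases h3 : pvOld3 <+: (c :: t)
          · obtain ⟨u, hu⟩ := h3
            rw [← hu, pv_branch3, pv_scan3, ih u (by
              have : (pvOld3 ++ u).length = (c :: t).length := by rw [hu]
              simp [pvOld3] at this ⊢; omega)]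
          · by_cases h4 : pvOld4 <+: (c :: t)
            · obtain ⟨u, hu⟩ := h4
              rw [← hu, pv_branch4, pv_scan4, ih u (by
                have : (pvOld4 ++ u).length = (c :: t).length := by rw [hu]
                simp [pvOld4] at this ⊢; omega)]
            · by_cases h5 : pvOld5 <+: (c :: t)
              · obtain ⟨u, hu⟩ := h5
                rw [← hu, pv_branch5, pv_scan5, ih u (by
                  have : (pvOld5 ++ u).length = (c :: t).length := by rw [hu]
                  simp [pvOld5] at this ⊢; omega)]
              · -- no pattern matches at this position
                have n2 : ¬ pvOld2 <+: c :: pvRep pvOld1 pvNew1 t := fun h =>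
                  h2 (pv_prefix_cons_rep pvOld1 pvNew1 _ _ (by decide) _ _ h)
                have n3 : ¬ pvOld3 <+: c :: pvRep pvOld2 pvNew2 (pvRep pvOld1 pvNew1 t) := fun h =>
                  h3 (pv_prefix_cons_rep pvOld1 pvNew1 _ _ (by decide) _ _
                    (pv_prefix_cons_rep pvOld2 pvNew2 _ _ (by decide) _ _ h))
                have n4 : ¬ pvOld4 <+: c :: pvRep pvOld3 pvNew3 (pvRep pvOld2 pvNew2 (pvRep pvOld1 pvNew1 t)) := fun h =>
                  h4 (pv_prefix_cons_rep pvOld1 pvNew1 _ _ (by decide) _ _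
                    (pv_prefix_cons_rep pvOld2 pvNew2 _ _ (by decide) _ _
                      (pv_prefix_cons_rep pvOld3 pvNew3 _ _ (by decide) _ _ h)))
                have n5 : ¬ pvOld5 <+: c :: pvRep pvOld4 pvNew4 (pvRep pvOld3 pvNew3 (pvRep pvOld2 pvNew2 (pvRep pvOld1 pvNew1 t))) := fun h =>
                  h5 (pv_prefix_cons_rep pvOld1 pvNew1 _ _ (by decide) _ _
                    (pv_prefix_cons_rep pvOld2 pvNew2 _ _ (by decide) _ _
                      (pv_prefix_cons_rep pvOld3 pvNew3 _ _ (by decide) _ _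
                        (pv_prefix_cons_rep pvOld4 pvNew4 _ _ (by decide) _ _ h))))
                rw [pv_rep_nomatch _ _ _ _ h1, pv_rep_nomatch _ _ _ _ n2,
                  pv_rep_nomatch _ _ _ _ n3, pv_rep_nomatch _ _ _ _ n4,
                  pv_rep_nomatch _ _ _ _ n5,
                  ih t (by omega),
                  pv_scan_nomatch c t h1 h2 h3 h4 h5]

lemma pv_A_toList (title : String) :
    (normalize_conventions_py title).toList =
    pvRep pvOld5 pvNew5 (pvRep pvOld4 pvNew4 (pvRep pvOld3 pvNew3 (pvRep pvOld2 pvNew2 (pvRep pvOld1 pvNew1 title.toList)))) := by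
  simp only [normalize_conventions_py, List.foldl, PySem.Str.toList_replace]
  rw [pv_replace_eq _ _ (by decide), pv_replace_eq _ _ (by decide),
    pv_replace_eq _ _ (by decide), pv_replace_eq _ _ (by decide),
    pv_replace_eq _ _ (by decide)]
  rfl

-- ===== VERDICT (by name: the statement is the Claim_ definition above) =====
theorem normalize_conventions_py_spec : Claim_equal_normalize_conventions_py := by
  intro title _
  unfold Spec_normalize_conventions_py normalize_conventions_py_alt
  rw [← pv_chain_eq_scan title.toList.length title.toList le_rfl, ← pv_A_toList]
  simp
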